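-- pv_equiv track=rewrite | github.com/rivertw777/Algorithm | 프로그래머스/2/42626. 더 맵게/더 맵게.py | solution
-- ===== SOURCE A (Python) =====
-- import heapq as hq
--
-- def solution(scoville, k):
--     answer = 0
--
--     q = []
--
--     for i in scoville:
--         hq.heappush(q, i)
--
--     count = 0
--     while q:
--         first = hq.heappop(q)
--
--         if first >= k:
--             return count
--
--         if q:
--             second = hq.heappop(q)
--             new = first + (second * 2)
--             count += 1
--             hq.heappush(q, new)
--         else:
--             break
--
--     return -1
-- ===== SOURCE B (Python) =====
-- def solution(scoville, k):
--     arr = sorted(scoville)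
--     mixes = []
--     i = j = 0
--     count = 0
--     def pop():
--         nonlocal i, j
--         if i < len(arr) and (j >= len(mixes) or arr[i] <= mixes[j]):
--             v = arr[i]; i += 1
--         else:
--             v = mixes[j]; j += 1
--         return v
--     while i < len(arr) or j < len(mixes):
--         first = pop()
--         if first >= k:
--             return count
--         if i < len(arr) or j < len(mixes):
--             second = pop()
--             mixes.append(first + second * 2)
--             count += 1
--         else:
--             return -1
--     return -1
-- ===== Notes on version B (the rewrite author's own statement) =====
-- stated objective: alternative
-- what changed: Drops the priority queue entirely: the classic two-queues merge technique — sort once, then take minima by comparing the fronts of the sorted input (index i) and of a plain FIFO list of created mixes (index j, appended at the back, never re-ordered); correctness rests on the invariant that the live suffix of the FIFO is nondecreasing, so no heap or binary insertion is ever performed.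
import Mathlib
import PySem

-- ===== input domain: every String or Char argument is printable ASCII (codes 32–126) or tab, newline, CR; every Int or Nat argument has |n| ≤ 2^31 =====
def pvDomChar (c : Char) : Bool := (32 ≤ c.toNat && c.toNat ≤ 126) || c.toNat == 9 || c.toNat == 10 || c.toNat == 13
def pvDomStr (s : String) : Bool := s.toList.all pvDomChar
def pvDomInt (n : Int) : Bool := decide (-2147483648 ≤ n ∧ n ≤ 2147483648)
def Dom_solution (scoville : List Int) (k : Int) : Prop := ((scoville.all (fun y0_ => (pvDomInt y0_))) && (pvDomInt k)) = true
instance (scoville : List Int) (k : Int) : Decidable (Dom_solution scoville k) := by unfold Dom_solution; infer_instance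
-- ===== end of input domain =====

-- B replaces A's heap by the two-queues merge technique: sort once, then take each minimum
-- from the fronts of the sorted input and of a plain FIFO of created mixes (appended at
-- the back, never re-ordered); objective: alternative.

-- ===== PORT A =====
-- A uses the heapq library. Its observable behaviour (heappop removes and returns a minimal
-- element, heappush adds one) is ported as a skew heap; the popped Int VALUES are identical
-- to heapq's on every input (any min-heap pops the same value sequence), so the port is
-- exact. The Nat arguments below are fuel bounds that only make the recursions structural;
-- they are always sufficient at the call sites used.
inductive SkewHeap where
  | nil : SkewHeap
  | node : Int → SkewHeap → SkewHeap → SkewHeap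
deriving DecidableEq, Repr

def SkewHeap.size : SkewHeap → Nat
  | .nil => 0
  | .node _ a b => 1 + a.size + b.size

-- fuel-bounded skew-heap merge; fuel ≥ a.size + b.size always suffices
def SkewHeap.merge : Nat → SkewHeap → SkewHeap → SkewHeap
  | 0, _, _ => .nil
  | _ + 1, .nil, h => h
  | _ + 1, h, .nil => h
  | f + 1, .node x a b, .node y c d =>
    if x ≤ y then .node x (SkewHeap.merge f b (.node y c d)) a
    else .node y (SkewHeap.merge f d (.node x a b)) c

def SkewHeap.meld (a b : SkewHeap) : SkewHeap := SkewHeap.merge (a.size + b.size) a b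

-- hq.heappush q i
def SkewHeap.push (h : SkewHeap) (v : Int) : SkewHeap := SkewHeap.meld (.node v .nil .nil) h

-- A's while loop: pop first; return count if first >= k; else pop second, push first+second*2.
-- fuel ≥ h.size suffices (the heap shrinks by one element per iteration).
def heapLoop : Nat → Int → SkewHeap → Int → Int
  | 0, _, _, _ => -1
  | f + 1, k, h, c =>
    match h with
    | .nil => -1                                 -- while q: … falls through → return -1
    | .node x a b =>                             -- first = hq.heappop(q)
      if x ≥ k then c                            -- if first >= k: return count
      else
        match SkewHeap.meld a b with
        | .nil => -1                             -- else: break → return -1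
        | .node y cl cr =>                       -- second = hq.heappop(q); heappush(q, new)
          heapLoop f k ((SkewHeap.meld cl cr).push (x + y * 2)) (c + 1)

def solution (scoville : List Int) (k : Int) : Int :=
  let q := scoville.foldl SkewHeap.push .nil     -- for i in scoville: hq.heappush(q, i)
  heapLoop q.size k q 0                          -- count = 0; while q: …

-- ===== PORT B =====
-- Source B's pop(): take the front of arr if arr has elements left and (mixes exhausted or
-- arr front <= mixes front), else the front of mixes; none iff both are exhausted (the
-- loop conditions). The index pointers i, j are ported as the remaining suffixes.
def popQ (arr mixes : List Int) : Option (Int × List Int × List Int) :=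
  match arr, mixes with
  | [], [] => none
  | [], m :: mt => some (m, [], mt)
  | a :: at_, [] => some (a, at_, [])
  | a :: at_, m :: mt => if a ≤ m then some (a, at_, m :: mt) else some (m, a :: at_, mt)

-- Source B's while loop; fuel ≥ arr.length + mixes.length suffices (the total number of
-- remaining elements shrinks by one per iteration).
def twoLoop : Nat → Int → List Int → List Int → Int → Int
  | 0, _, _, _, _ => -1
  | f + 1, k, arr, mixes, c =>
    match popQ arr mixes with
    | none => -1                                 -- while …: falls through → return -1
    | some (first, a1, m1) =>                    -- first = pop()
      if first ≥ k then c                        -- if first >= k: return count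
      else
        match popQ a1 m1 with
        | none => -1                             -- else: return -1
        | some (second, a2, m2) =>               -- second = pop(); mixes.append(...)
          twoLoop f k a2 (m2 ++ [first + second * 2]) (c + 1)

def solution_alt (scoville : List Int) (k : Int) : Int :=
  twoLoop (PySem.List.sorted scoville (fun x => x) false).length k
    (PySem.List.sorted scoville (fun x => x) false) [] 0

-- ===== PRECONDITION & SPEC =====
def Spec_solution (scoville : List Int) (k : Int) (out : Int) : Prop := out = solution_alt scoville k
instance (scoville : List Int) (k : Int) (out : Int) : Decidable (Spec_solution scoville k out) := by unfold Spec_solution; infer_instance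

-- ===== CLAIM (what is proved, stated in full; the proofs are below) =====
def Claim_equal_solution : Prop := ∀ (scoville : List Int) (k : Int), Dom_solution scoville k → Spec_solution scoville k (solution scoville k)

-- ===== LEMMAS AND PROOFS =====

def SkewHeap.toMul : SkewHeap → Multiset Int
  | .nil => 0
  | .node x a b => x ::ₘ (a.toMul + b.toMul)

def SkewHeap.IsHeap : SkewHeap → Prop
  | .nil => True
  | .node x a b => (∀ y ∈ a.toMul + b.toMul, x ≤ y) ∧ a.IsHeap ∧ b.IsHeap

theorem SkewHeap.size_merge : ∀ (f : Nat) (a b : SkewHeap), a.size + b.size ≤ f →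
    (SkewHeap.merge f a b).size = a.size + b.size := by
  intro f
  induction f with
  | zero =>
    intro a b hf
    cases a <;> cases b <;> simp_all [SkewHeap.merge, SkewHeap.size]
  | succ f ih =>
    intro a b hf
    cases a with
    | nil => simp [SkewHeap.merge, SkewHeap.size]
    | node x a1 a2 =>
      cases b with
      | nil => simp [SkewHeap.merge, SkewHeap.size]
      | node y b1 b2 =>
        simp only [SkewHeap.merge]
        simp only [SkewHeap.size] at hf
        split
        · rw [SkewHeap.size, ih a2 (.node y b1 b2) (by simp [SkewHeap.size]; omega)]
          simp [SkewHeap.size]; omega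
        · rw [SkewHeap.size, ih b2 (.node x a1 a2) (by simp [SkewHeap.size]; omega)]
          simp [SkewHeap.size]; omega

theorem SkewHeap.toMul_merge : ∀ (f : Nat) (a b : SkewHeap), a.size + b.size ≤ f →
    (SkewHeap.merge f a b).toMul = a.toMul + b.toMul := by
  intro f
  induction f with
  | zero =>
    intro a b hf
    cases a <;> cases b <;> simp_all [SkewHeap.merge, SkewHeap.size, SkewHeap.toMul]
  | succ f ih =>
    intro a b hf
    cases a with
    | nil => simp [SkewHeap.merge, SkewHeap.toMul]
    | node x a1 a2 =>
      cases b with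
      | nil => simp [SkewHeap.merge, SkewHeap.toMul]
      | node y b1 b2 =>
        simp only [SkewHeap.merge]
        simp only [SkewHeap.size] at hf
        split
        · rw [SkewHeap.toMul, ih a2 (.node y b1 b2) (by simp [SkewHeap.size]; omega)]
          show x ::ₘ (a2.toMul + (y ::ₘ (b1.toMul + b2.toMul)) + a1.toMul)
              = x ::ₘ (a1.toMul + a2.toMul) + y ::ₘ (b1.toMul + b2.toMul)
          simp only [← Multiset.singleton_add]
          abel
        · rw [SkewHeap.toMul, ih b2 (.node x a1 a2) (by simp [SkewHeap.size]; omega)]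
          show y ::ₘ (b2.toMul + (x ::ₘ (a1.toMul + a2.toMul)) + b1.toMul)
              = x ::ₘ (a1.toMul + a2.toMul) + y ::ₘ (b1.toMul + b2.toMul)
          simp only [← Multiset.singleton_add]
          abel

theorem SkewHeap.isHeap_merge : ∀ (f : Nat) (a b : SkewHeap), a.size + b.size ≤ f →
    a.IsHeap → b.IsHeap → (SkewHeap.merge f a b).IsHeap := by
  intro f
  induction f with
  | zero =>
    intro a b hf _ _
    cases a <;> cases b <;> simp_all [SkewHeap.merge, SkewHeap.size, SkewHeap.IsHeap]
  | succ f ih =>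
    intro a b hf ha hb
    cases a with
    | nil => simpa [SkewHeap.merge] using hb
    | node x a1 a2 =>
      cases b with
      | nil => simpa [SkewHeap.merge] using ha
      | node y b1 b2 =>
        obtain ⟨hax, ha1, ha2⟩ := ha
        obtain ⟨hby, hb1, hb2⟩ := hb
        simp only [SkewHeap.merge]
        simp only [SkewHeap.size] at hf
        have hfa : a2.size + (SkewHeap.node y b1 b2).size ≤ f := by
          simp [SkewHeap.size]; omega
        have hfb : b2.size + (SkewHeap.node x a1 a2).size ≤ f := by
          simp [SkewHeap.size]; omega
        split
        · rename_i hle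
          refine ⟨?_, ih a2 (.node y b1 b2) hfa ha2 ⟨hby, hb1, hb2⟩, ha1⟩
          intro z hz
          rcases Multiset.mem_add.mp hz with hz | hz
          · rw [SkewHeap.toMul_merge f a2 (.node y b1 b2) hfa] at hz
            rcases Multiset.mem_add.mp hz with hz | hz
            · exact hax z (Multiset.mem_add.mpr (Or.inr hz))
            · rcases Multiset.mem_cons.mp hz with rfl | hz
              · exact hle
              · exact le_trans hle (hby z hz)
          · exact hax z (Multiset.mem_add.mpr (Or.inl hz))
        · rename_i hle
          have hyx : y ≤ x := by omega
          refine ⟨?_, ih b2 (.node x a1 a2) hfb hb2 ⟨hax, ha1, ha2⟩, hb1⟩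
          intro z hz
          rcases Multiset.mem_add.mp hz with hz | hz
          · rw [SkewHeap.toMul_merge f b2 (.node x a1 a2) hfb] at hz
            rcases Multiset.mem_add.mp hz with hz | hz
            · exact hby z (Multiset.mem_add.mpr (Or.inr hz))
            · rcases Multiset.mem_cons.mp hz with rfl | hz
              · exact hyx
              · exact le_trans hyx (hax z hz)
          · exact hby z (Multiset.mem_add.mpr (Or.inl hz))

theorem SkewHeap.size_meld (a b : SkewHeap) : (a.meld b).size = a.size + b.size :=
  SkewHeap.size_merge _ a b (le_refl _)

theorem SkewHeap.toMul_meld (a b : SkewHeap) : (a.meld b).toMul = a.toMul + b.toMul :=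
  SkewHeap.toMul_merge _ a b (le_refl _)

theorem SkewHeap.isHeap_meld (a b : SkewHeap) (ha : a.IsHeap) (hb : b.IsHeap) :
    (a.meld b).IsHeap :=
  SkewHeap.isHeap_merge _ a b (le_refl _) ha hb

theorem SkewHeap.root_le (x : Int) (a b : SkewHeap) (hh : (SkewHeap.node x a b).IsHeap) :
    ∀ y ∈ (SkewHeap.node x a b).toMul, x ≤ y := by
  intro y hy
  simp [SkewHeap.toMul] at hy
  rcases hy with rfl | hy | hy
  · exact le_refl _
  · exact hh.1 y (by simp [hy])
  · exact hh.1 y (by simp [hy])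

theorem SkewHeap.size_push (h : SkewHeap) (v : Int) : (h.push v).size = 1 + h.size := by
  rw [SkewHeap.push, SkewHeap.size_meld]; rfl

theorem SkewHeap.toMul_push (h : SkewHeap) (v : Int) : (h.push v).toMul = v ::ₘ h.toMul := by
  rw [SkewHeap.push, SkewHeap.toMul_meld]
  show (v ::ₘ (0 + 0)) + h.toMul = v ::ₘ h.toMul
  simp

theorem SkewHeap.isHeap_push (h : SkewHeap) (v : Int) (hh : h.IsHeap) : (h.push v).IsHeap := by
  apply SkewHeap.isHeap_meld
  · exact ⟨by simp [SkewHeap.toMul], trivial, trivial⟩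
  · exact hh

theorem build_toMul (l : List Int) (h : SkewHeap) :
    (l.foldl SkewHeap.push h).toMul = h.toMul + ↑l := by
  induction l generalizing h with
  | nil => simp
  | cons x t ih =>
    rw [List.foldl_cons, ih, SkewHeap.toMul_push]
    show x ::ₘ h.toMul + ↑t = h.toMul + x ::ₘ ↑t
    rw [← Multiset.singleton_add, ← Multiset.singleton_add]
    abel

theorem build_isHeap (l : List Int) (h : SkewHeap) (hh : h.IsHeap) :
    (l.foldl SkewHeap.push h).IsHeap := by
  induction l generalizing h with
  | nil => exact hh
  | cons x t ih => exact ih _ (SkewHeap.isHeap_push h x hh)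

-- proof-only intermediate: the "fully sorted working list" view of the process,
-- used as a bridge between the heap (port A) and the two-queues loop (port B)
def insort (l : List Int) (v : Int) : List Int :=
  match l with
  | [] => [v]
  | h :: t => if v < h then v :: h :: t else h :: insort t v

def listLoop : Nat → Int → List Int → Int → Int
  | 0, _, _, _ => -1
  | f + 1, k, s, c =>
    match s with
    | [] => -1
    | x :: rest =>
      if x ≥ k then c
      else
        match rest with
        | [] => -1
        | y :: rest2 =>
          listLoop f k (insort rest2 (x + y * 2)) (c + 1)

theorem mem_insort (l : List Int) (v y : Int) : y ∈ insort l v ↔ y = v ∨ y ∈ l := by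
  induction l with
  | nil => simp [insort]
  | cons h t ih =>
    simp only [insort]
    split
    · simp
    · simp [ih]
      tauto

theorem length_insort (l : List Int) (v : Int) : (insort l v).length = l.length + 1 := by
  induction l with
  | nil => simp [insort]
  | cons h t ih => simp only [insort]; split <;> simp [ih]

theorem toMul_insort (l : List Int) (v : Int) : (↑(insort l v) : Multiset Int) = v ::ₘ ↑l := by
  induction l with
  | nil => simp [insort]
  | cons h t ih =>
    simp only [insort]
    split
    · simp
    · show h ::ₘ (↑(insort t v) : Multiset Int) = v ::ₘ h ::ₘ ↑t
      rw [ih, Multiset.cons_swap]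

theorem sorted_insort (l : List Int) (v : Int) (hs : l.Pairwise (· ≤ ·)) :
    (insort l v).Pairwise (· ≤ ·) := by
  induction l with
  | nil => simp [insort]
  | cons h t ih =>
    rw [List.pairwise_cons] at hs
    obtain ⟨hh, ht⟩ := hs
    simp only [insort]
    split
    · rename_i hlt
      refine List.pairwise_cons.mpr ⟨?_, List.pairwise_cons.mpr ⟨hh, ht⟩⟩
      intro b hb
      rcases List.mem_cons.mp hb with rfl | hb
      · omega
      · exact le_trans (le_of_lt hlt) (hh b hb)
    · rename_i hnlt
      refine List.pairwise_cons.mpr ⟨?_, ih ht⟩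
      intro b hb
      rcases (mem_insort t v b).mp hb with rfl | hb
      · omega
      · exact hh b hb

theorem loop_eq (k : Int) : ∀ (f g : Nat) (h : SkewHeap) (c : Int) (s : List Int),
    h.size ≤ f → s.length ≤ g → h.IsHeap → s.Pairwise (· ≤ ·) → h.toMul = ↑s →
    heapLoop f k h c = listLoop g k s c := by
  intro f
  induction f with
  | zero =>
    intro g h c s hf hg hh hs hm
    have hnil : h = .nil := by
      cases h with
      | nil => rfl
      | node x a b => simp [SkewHeap.size] at hf
    subst hnil
    have hs0 : s = [] := by
      have h0 : (↑s : Multiset Int) = 0 := by rw [← hm]; rfl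
      simpa using h0
    subst hs0
    cases g <;> simp [heapLoop, listLoop]
  | succ f IH =>
    intro g h c s hf hg hh hs hm
    cases h with
    | nil =>
      have hs0 : s = [] := by
        have h0 : (↑s : Multiset Int) = 0 := by rw [← hm]; rfl
        simpa using h0
      subst hs0
      cases g <;> simp [heapLoop, listLoop]
    | node x a b =>
      obtain ⟨y, t, rfl⟩ : ∃ y t, s = y :: t := by
        cases s with
        | nil => exfalso; simp [SkewHeap.toMul] at hm
        | cons y t => exact ⟨y, t, rfl⟩
      obtain ⟨g, rfl⟩ : ∃ g', g = g' + 1 := by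
        cases g with
        | zero => simp at hg
        | succ g' => exact ⟨g', rfl⟩
      have hhead : ∀ z ∈ t, y ≤ z := fun z hz => List.rel_of_pairwise_cons hs hz
      have hxy : x = y := by
        have h1 : x ≤ y := by
          have : y ∈ (SkewHeap.node x a b).toMul := by rw [hm]; simp
          exact SkewHeap.root_le x a b hh y this
        have h2 : y ≤ x := by
          have hx : x ∈ (y ::ₘ (↑t : Multiset Int)) := by
            rw [Multiset.cons_coe, ← hm]; simp [SkewHeap.toMul]
          rcases Multiset.mem_cons.mp hx with rfl | hx2
          · exact le_refl _
          · exact hhead x (by exact_mod_cast hx2)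
        omega
      subst hxy
      have hrest : a.toMul + b.toMul = ↑t := by
        have h3 : x ::ₘ (a.toMul + b.toMul) = x ::ₘ (↑t : Multiset Int) := hm
        exact (Multiset.cons_inj_right x).mp h3
      by_cases hk : x ≥ k
      · simp [heapLoop, listLoop, hk]
      · simp only [heapLoop, listLoop, if_neg hk]
        cases hmr : SkewHeap.meld a b with
        | nil =>
          have ht0 : t = [] := by
            have h0 : (↑t : Multiset Int) = 0 := by
              rw [← hrest]
              have h4 := SkewHeap.toMul_meld a b
              rw [hmr] at h4
              exact h4.symm
            simpa using h0
          subst ht0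
          rfl
        | node z cl cr =>
          have hmz : (z ::ₘ (cl.toMul + cr.toMul)) = (↑t : Multiset Int) := by
            rw [← hrest]
            have h4 := SkewHeap.toMul_meld a b
            rw [hmr] at h4
            exact h4
          have hheapM : (SkewHeap.node z cl cr).IsHeap := by
            have h5 := SkewHeap.isHeap_meld a b hh.2.1 hh.2.2
            rwa [hmr] at h5
          obtain ⟨w, t2, rfl⟩ : ∃ w t2, t = w :: t2 := by
            cases t with
            | nil => exfalso; simp at hmz
            | cons w t2 => exact ⟨w, t2, rfl⟩
          have ht2 : (w :: t2).Pairwise (fun a b => a ≤ b) := hs.of_cons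
          have hzw : z = w := by
            have h1 : z ≤ w := by
              have hw : w ∈ (SkewHeap.node z cl cr).toMul := by
                show w ∈ z ::ₘ (cl.toMul + cr.toMul)
                rw [hmz]; simp
              exact SkewHeap.root_le z cl cr hheapM w hw
            have h2 : w ≤ z := by
              have hzmem : z ∈ (w ::ₘ (↑t2 : Multiset Int)) := by
                rw [Multiset.cons_coe, ← hmz]; simp
              rcases Multiset.mem_cons.mp hzmem with rfl | hz2
              · exact le_refl _
              · exact List.rel_of_pairwise_cons ht2 (by exact_mod_cast hz2)
            omega
          subst hzw
          have hrest2 : cl.toMul + cr.toMul = ↑t2 := by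
            have h3 : z ::ₘ (cl.toMul + cr.toMul) = z ::ₘ (↑t2 : Multiset Int) := hmz
            exact (Multiset.cons_inj_right z).mp h3
          have hszm : cl.size + cr.size + 1 = a.size + b.size := by
            have e1 := SkewHeap.size_meld a b
            rw [hmr] at e1
            simp [SkewHeap.size] at e1
            omega
          apply IH g _ (c + 1) (insort t2 (x + z * 2))
          · rw [SkewHeap.size_push, SkewHeap.size_meld]
            simp [SkewHeap.size] at hf
            omega
          · rw [length_insort]
            simp at hg
            omega
          · exact SkewHeap.isHeap_push _ _ (SkewHeap.isHeap_meld cl cr hheapM.2.1 hheapM.2.2)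
          · exact sorted_insort t2 (x + z * 2) (ht2.of_cons)
          · rw [SkewHeap.toMul_push, SkewHeap.toMul_meld, hrest2, toMul_insort]

-- popQ pops a minimal element: multiset splitting, minimality, preserved sortedness,
-- and the mixes remainder is a sublist of the old mixes
theorem popQ_none_iff (A M : List Int) : popQ A M = none ↔ A = [] ∧ M = [] := by
  cases A <;> cases M <;> simp [popQ]
  split <;> simp

theorem popQ_props (A M A1 M1 : List Int) (v : Int)
    (hAs : A.Pairwise (· ≤ ·)) (hMs : M.Pairwise (· ≤ ·))
    (h : popQ A M = some (v, A1, M1)) :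
    (↑A + ↑M : Multiset Int) = v ::ₘ (↑A1 + ↑M1) ∧
    (∀ z, z ∈ A1 ∨ z ∈ M1 → v ≤ z) ∧
    A1.Pairwise (· ≤ ·) ∧ M1.Pairwise (· ≤ ·) ∧
    (∀ z ∈ M1, z ∈ M) := by
  cases A with
  | nil =>
    cases M with
    | nil => simp [popQ] at h
    | cons m mt =>
      simp only [popQ, Option.some.injEq, Prod.mk.injEq] at h
      obtain ⟨rfl, rfl, rfl⟩ := h
      refine ⟨by simp, ?_, by simp, hMs.of_cons, fun z hz => List.mem_cons_of_mem _ hz⟩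
      intro z hz
      rcases hz with hz | hz
      · simp at hz
      · exact List.rel_of_pairwise_cons hMs hz
  | cons a at_ =>
    cases M with
    | nil =>
      simp only [popQ, Option.some.injEq, Prod.mk.injEq] at h
      obtain ⟨rfl, rfl, rfl⟩ := h
      refine ⟨by simp, ?_, hAs.of_cons, by simp, by simp⟩
      intro z hz
      rcases hz with hz | hz
      · exact List.rel_of_pairwise_cons hAs hz
      · simp at hz
    | cons m mt =>
      simp only [popQ] at h
      split at h
      · rename_i ham
        simp only [Option.some.injEq, Prod.mk.injEq] at h
        obtain ⟨rfl, rfl, rfl⟩ := h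
        refine ⟨?_, ?_, hAs.of_cons, hMs, fun z hz => hz⟩
        · show (↑(a :: at_) : Multiset Int) + ↑(m :: mt) = a ::ₘ (↑at_ + ↑(m :: mt))
          rw [← Multiset.cons_coe, Multiset.cons_add]
        · intro z hz
          rcases hz with hz | hz
          · exact List.rel_of_pairwise_cons hAs hz
          · rcases List.mem_cons.mp hz with rfl | hz
            · exact ham
            · exact le_trans ham (List.rel_of_pairwise_cons hMs hz)
      · rename_i ham
        simp only [Option.some.injEq, Prod.mk.injEq] at h
        obtain ⟨rfl, rfl, rfl⟩ := h
        have hma : m ≤ a := by omega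
        refine ⟨?_, ?_, hAs, hMs.of_cons, fun z hz => List.mem_cons_of_mem _ hz⟩
        · show (↑(a :: at_) : Multiset Int) + ↑(m :: mt) = m ::ₘ (↑(a :: at_) + ↑mt)
          rw [← Multiset.cons_coe a at_, ← Multiset.cons_coe m mt]
          rw [← Multiset.singleton_add, ← Multiset.singleton_add, ← Multiset.singleton_add]
          abel
        · intro z hz
          rcases hz with hz | hz
          · rcases List.mem_cons.mp hz with rfl | hz
            · exact hma
            · exact le_trans hma (List.rel_of_pairwise_cons hAs hz)
          · exact List.rel_of_pairwise_cons hMs hz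

theorem mem_add_coe {A M : List Int} {z : Int} (hz : z ∈ (↑A + ↑M : Multiset Int)) :
    z ∈ A ∨ z ∈ M := by
  rcases Multiset.mem_add.mp hz with h | h
  · exact Or.inl (Multiset.mem_coe.mp h)
  · exact Or.inr (Multiset.mem_coe.mp h)

-- a sorted list whose multiset is v ::ₘ S with v minimal starts with v
theorem head_of_sorted (L : List Int) (v : Int) (S : Multiset Int)
    (hL : L.Pairwise (· ≤ ·)) (hm : (↑L : Multiset Int) = v ::ₘ S)
    (hmin : ∀ z ∈ S, v ≤ z) : ∃ L', L = v :: L' ∧ (↑L' : Multiset Int) = S := by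
  cases L with
  | nil => simp at hm
  | cons x L' =>
    have hxv : x = v := by
      have h1 : v ≤ x := by
        have hx : x ∈ v ::ₘ S := by rw [← hm]; simp
        rcases Multiset.mem_cons.mp hx with rfl | hx
        · exact le_refl _
        · exact hmin x hx
      have h2 : x ≤ v := by
        have hv : v ∈ (↑(x :: L') : Multiset Int) := by rw [hm]; simp
        rw [Multiset.mem_coe] at hv
        rcases List.mem_cons.mp hv with rfl | hv
        · exact le_refl _
        · exact List.rel_of_pairwise_cons hL hv
      omega
    subst hxv
    refine ⟨L', rfl, ?_⟩
    refine (Multiset.cons_inj_right x).mp ?_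
    rw [Multiset.cons_coe]
    exact hm

theorem listLoop_nil (g : Nat) (k c : Int) : listLoop g k [] c = -1 := by
  cases g <;> simp [listLoop]

-- sorted-list loop = two-queues loop, under the FIFO invariant: every live mix value m
-- that survives the next two pops (y ≤ m for the two pool minima x, y) satisfies
-- m ≤ x + y*2, i.e. it is ≤ the next created mix — hence appending keeps mixes sorted.
theorem two_eq (k : Int) : ∀ (f g : Nat) (A M L : List Int) (c : Int),
    A.length + M.length ≤ f → L.length ≤ g →
    L.Pairwise (· ≤ ·) → A.Pairwise (· ≤ ·) → M.Pairwise (· ≤ ·) →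
    (↑L : Multiset Int) = ↑A + ↑M →
    (∀ m ∈ M, ∀ x y rest, L = x :: y :: rest → y ≤ m → m ≤ x + y * 2) →
    listLoop g k L c = twoLoop f k A M c := by
  intro f
  induction f with
  | zero =>
    intro g A M L c hf hg _ _ _ hm _
    have hA : A = [] := by
      cases A with
      | nil => rfl
      | cons _ _ => simp at hf
    have hM : M = [] := by
      cases M with
      | nil => rfl
      | cons _ _ => rw [hA] at hf; simp at hf
    subst hA; subst hM
    have hL : L = [] := by
      have h0 : (↑L : Multiset Int) = 0 := by rw [hm]; simp
      simpa using h0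
    subst hL
    rw [listLoop_nil]
    rfl
  | succ f IH =>
    intro g A M L c hf hg hLs hAs hMs hm hinv
    cases hp : popQ A M with
    | none =>
      obtain ⟨rfl, rfl⟩ := (popQ_none_iff A M).mp hp
      have hL : L = [] := by
        have h0 : (↑L : Multiset Int) = 0 := by rw [hm]; simp
        simpa using h0
      subst hL
      rw [listLoop_nil]
      simp [twoLoop, hp]
    | some t =>
      obtain ⟨v, A1, M1⟩ := t
      obtain ⟨hms, hmin, hA1s, hM1s, hM1sub⟩ := popQ_props A M A1 M1 v hAs hMs hp
      obtain ⟨L', rfl, hL'⟩ := head_of_sorted L v (↑A1 + ↑M1) hLs (by rw [hm, hms])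
        (fun z hz => hmin z (mem_add_coe hz))
      obtain ⟨g, rfl⟩ : ∃ g', g = g' + 1 := by
        cases g with
        | zero => simp at hg
        | succ g' => exact ⟨g', rfl⟩
      simp only [listLoop, twoLoop, hp]
      by_cases hk : v ≥ k
      · rw [if_pos hk, if_pos hk]
      · rw [if_neg hk, if_neg hk]
        cases hp2 : popQ A1 M1 with
        | none =>
          obtain ⟨rfl, rfl⟩ := (popQ_none_iff A1 M1).mp hp2
          have hL' : L' = [] := by
            have h0 : (↑L' : Multiset Int) = 0 := by rw [hL']; simp
            simpa using h0
          subst hL'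
          rfl
        | some t2 =>
          obtain ⟨w, A2, M2⟩ := t2
          obtain ⟨hms2, hmin2, hA2s, hM2s, hM2sub⟩ := popQ_props A1 M1 A2 M2 w hA1s hM1s hp2
          obtain ⟨L'', rfl, hL''⟩ := head_of_sorted L' w (↑A2 + ↑M2) hLs.of_cons
            (by rw [hL', hms2])
            (fun z hz => hmin2 z (mem_add_coe hz))
          -- sizes
          have hlen : L''.length = A2.length + M2.length := by
            have := congrArg Multiset.card hL''
            simpa using this
          have hlen1 : (w :: L'').length = A1.length + M1.length := by
            have := congrArg Multiset.card hL'
            simpa using this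
          have hlenA : (v :: w :: L'').length = A.length + M.length := by
            have := congrArg Multiset.card hm
            simpa using this
          -- order facts about the pool v :: w :: L''
          have hvw : v ≤ w := List.rel_of_pairwise_cons hLs (by simp)
          have hwL : ∀ z ∈ L'', w ≤ z := fun z hz => List.rel_of_pairwise_cons hLs.of_cons hz
          -- every element of M2 is an old live mix, ≥ w, hence ≤ v + w*2 by the invariant
          have hM2le : ∀ m ∈ M2, m ≤ v + w * 2 := by
            intro m hmem
            have hmM : m ∈ M := hM1sub m (hM2sub m hmem)
            have hmL : m ∈ L'' := by
              have : (m : Int) ∈ (↑A2 + ↑M2 : Multiset Int) :=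
                Multiset.mem_add.mpr (Or.inr (Multiset.mem_coe.mpr hmem))
              rw [← hL''] at this
              exact Multiset.mem_coe.mp this
            exact hinv m hmM v w L'' rfl (hwL m hmL)
          apply IH g A2 (M2 ++ [v + w * 2]) (insort L'' (v + w * 2)) (c + 1)
          · simp only [List.length_append, List.length_cons, List.length_nil] at *
            omega
          · rw [length_insort]
            simp only [List.length_cons] at hg
            omega
          · exact sorted_insort _ _ hLs.of_cons.of_cons
          · exact hA2s
          · rw [List.pairwise_append]
            exact ⟨hM2s, by simp, by intro a ha b hb; simp at hb; subst hb; exact hM2le a ha⟩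
          · rw [toMul_insort, hL'']
            show (v + w * 2) ::ₘ (↑A2 + ↑M2) = ↑A2 + ↑(M2 ++ [v + w * 2])
            rw [← Multiset.coe_add]
            show (v + w * 2) ::ₘ (↑A2 + ↑M2) = ↑A2 + (↑M2 + ↑[v + w * 2])
            rw [← Multiset.singleton_add]
            have : (↑[v + w * 2] : Multiset Int) = {v + w * 2} := rfl
            rw [this]
            abel
          · -- re-establish the FIFO invariant for the new pool
            intro m hmem x y rest heq hym
            by_cases hnw : w ≤ v + w * 2
            · -- the new mix is ≥ w: every pool element is ≥ w, so x, y ≥ w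
              have hpool : ∀ z ∈ insort L'' (v + w * 2), w ≤ z := by
                intro z hz
                rcases (mem_insort L'' (v + w * 2) z).mp hz with rfl | hz
                · exact hnw
                · exact hwL z hz
              have hx : w ≤ x := hpool x (by rw [heq]; simp)
              have hy : w ≤ y := hpool y (by rw [heq]; simp)
              have hmle : m ≤ v + w * 2 := by
                rcases List.mem_append.mp hmem with hmem | hmem
                · exact hM2le m hmem
                · simp at hmem; omega
              omega
            · -- the new mix is < w: all old mixes are gone, and the new one is the pool
              -- minimum, so the hypothesis y ≤ m is contradictory
              have hM2nil : M2 = [] := by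
                cases M2 with
                | nil => rfl
                | cons m0 mt0 =>
                  exfalso
                  have h1 : m0 ≤ v + w * 2 := hM2le m0 (by simp)
                  have h2 : w ≤ m0 := by
                    apply hwL
                    have hmm : (m0 : Int) ∈ (↑A2 + ↑(m0 :: mt0) : Multiset Int) :=
                      Multiset.mem_add.mpr (Or.inr (by simp))
                    rw [← hL''] at hmm
                    exact Multiset.mem_coe.mp hmm
                  omega
              subst hM2nil
              simp only [List.nil_append, List.mem_singleton] at hmem
              subst hmem
              cases L'' with
              | nil => simp [insort] at heq
              | cons h0 t0 =>
                have hh0 : v + w * 2 < h0 := by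
                  have := hwL h0 (by simp)
                  omega
                rw [insort, if_pos hh0] at heq
                obtain ⟨rfl, rfl, rfl⟩ : x = v + w * 2 ∧ y = h0 ∧ rest = t0 := by
                  injection heq with e1 e2
                  injection e2 with e3 e4
                  exact ⟨e1.symm, e3.symm, e4.symm⟩
                have := hwL y (by simp)
                omega

-- ===== VERDICT (by name: the statement is the Claim_ definition above) =====
theorem solution_spec : Claim_equal_solution := by
  unfold Claim_equal_solution
  intro sc k _
  unfold Spec_solution
  have hsort : (PySem.List.sorted sc (fun x => x) false).Pairwise (· ≤ ·) := by
    simpa using PySem.List.sorted_pairwise (xs := sc) (key := fun x => x)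
  have hperm : (↑(PySem.List.sorted sc (fun x => x) false) : Multiset Int) = ↑sc :=
    Multiset.coe_eq_coe.mpr (PySem.List.sorted_perm sc (fun x => x) false)
  have h1 : solution sc k = listLoop (PySem.List.sorted sc (fun x => x) false).length k
      (PySem.List.sorted sc (fun x => x) false) 0 := by
    unfold solution
    apply loop_eq
    · exact le_refl _
    · exact le_refl _
    · exact build_isHeap sc .nil trivial
    · exact hsort
    · rw [build_toMul]
      have h0 : SkewHeap.nil.toMul = 0 := rfl
      rw [h0, zero_add, hperm]
  have h2 : listLoop (PySem.List.sorted sc (fun x => x) false).length k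
      (PySem.List.sorted sc (fun x => x) false) 0 = solution_alt sc k := by
    unfold solution_alt
    exact two_eq k _ _ _ [] _ 0 (by simp) (le_refl _) hsort hsort (by simp)
      (by simp) (by simp)
  exact h1.trans h2
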